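-- pv_equiv track=rewrite | github.com/lybbn/RuYi-Panel | apps/syswaf/data/generate_china_ip.py | num_to_prefix
-- ===== SOURCE A (Python) =====
-- def num_to_prefix(num):
--     """根据IP数量计算CIDR前缀"""
--     if num == 0:
--         return 0
--     prefix = 32
--     while num > 1:
--         num //= 2
--         prefix -= 1
--     return prefix
-- ===== SOURCE B (Python) =====
-- def num_to_prefix(num):
--     """根据IP数量计算CIDR前缀"""
--     if num == 0:
--         return 0
--     if num <= 1:
--         return 32
--     return 33 - num.bit_length()
-- ===== Notes on version B (the rewrite author's own statement) =====
-- stated objective: idiomatic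
-- what changed: Replaces the halving while-loop with the closed form 33 - num.bit_length() (floor(log2(num)) = bit_length-1), keeping the guards for num == 0 and num <= 1 where the loop never runs.
import Mathlib
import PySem

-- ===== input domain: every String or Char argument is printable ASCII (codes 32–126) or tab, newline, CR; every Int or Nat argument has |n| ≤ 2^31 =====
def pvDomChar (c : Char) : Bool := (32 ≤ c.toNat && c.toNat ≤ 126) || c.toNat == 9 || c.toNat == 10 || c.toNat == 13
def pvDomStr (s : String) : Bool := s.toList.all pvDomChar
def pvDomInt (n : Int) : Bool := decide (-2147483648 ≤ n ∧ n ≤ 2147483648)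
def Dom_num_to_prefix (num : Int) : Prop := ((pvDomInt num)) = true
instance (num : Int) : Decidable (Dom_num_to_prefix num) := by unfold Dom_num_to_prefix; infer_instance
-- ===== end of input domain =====

-- B replaces the halving loop by the closed form 33 - bit_length (idiomatic, O(1)); return values proved equal for all Int.
-- ===== PORT A =====
def numLoopA (num prefix_ : Int) : Int :=
  if 1 < num then numLoopA (PySem.Int.floordiv num 2) (prefix_ - 1) else prefix_
termination_by num.toNat
decreasing_by
  have h2 : PySem.Int.floordiv num 2 = num / 2 := PySem.Int.floordiv_eq_ediv_of_pos (by omega)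
  have h3 : num / 2 < num := by
    have := Int.mul_ediv_add_emod num 2
    have := Int.emod_nonneg num (show (2:Int) ≠ 0 by omega)
    omega
  have h4 : 0 ≤ num / 2 := Int.ediv_nonneg (by omega) (by omega)
  omega

def num_to_prefix (num : Int) : Int :=
  if num = 0 then 0 else numLoopA num 32

-- ===== PORT B =====
def num_to_prefix_alt (num : Int) : Int :=
  if num = 0 then 0
  else if num ≤ 1 then 32
  else 33 - (PySem.Int.bitLength num : Int)

-- ===== PRECONDITION & SPEC =====
def Spec_num_to_prefix (num : Int) (out : Int) : Prop := out = num_to_prefix_alt num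
instance (num : Int) (out : Int) : Decidable (Spec_num_to_prefix num out) := by unfold Spec_num_to_prefix; infer_instance

-- ===== CLAIM (what is proved, stated in full; the proofs are below) =====
def Claim_equal_num_to_prefix : Prop := ∀ (num : Int), Dom_num_to_prefix num → Spec_num_to_prefix num (num_to_prefix num)

-- ===== LEMMAS AND PROOFS =====

-- ===== VERDICT (by name: the statement is the Claim_ definition above) =====
theorem numLoopA_eq (num prefix_ : Int) (h : 0 < num) :
    numLoopA num prefix_ = prefix_ + 1 - (PySem.Int.bitLength num : Int) := by
  induction num, prefix_ using numLoopA.induct with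
  | case1 num prefix_ hlt ih =>
    have hpos : 0 < PySem.Int.floordiv num 2 := by
      rw [PySem.Int.floordiv_eq_ediv_of_pos (by omega)]
      have := Int.le_ediv_iff_mul_le (a := 1) (b := num) (c := 2) (by omega)
      omega
    rw [numLoopA, if_pos hlt, ih hpos, PySem.Int.bitLength_of_pos h]
    push_cast
    ring
  | case2 num prefix_ hlt =>
    have : num = 1 := by omega
    subst this
    rw [numLoopA]
    have h1 : PySem.Int.bitLength (1 : Int) = 1 := by decide
    simp [h1]

theorem num_to_prefix_spec : Claim_equal_num_to_prefix := by
  intro num _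
  unfold Spec_num_to_prefix num_to_prefix num_to_prefix_alt
  by_cases h0 : num = 0
  · simp [h0]
  · rw [if_neg h0, if_neg h0]
    by_cases h1 : num ≤ 1
    · rw [if_pos h1, numLoopA, if_neg (by omega)]
    · rw [if_neg h1, numLoopA_eq num 32 (by omega)]
      ring
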